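-- pv_equiv track=rewrite | github.com/rfoldhzi/Tussel | client.py | TotalRange
-- ===== SOURCE A (Python) =====
-- def checkRangePos(a,b):
--     return max(abs(a[0]-b[0]), abs(a[1]-b[1]))
--
-- def checkRangePosX(a,b):
--     return abs(a[0]-b[0])
--
-- def checkRangePosY(a,b):
--     return abs(a[1]-b[1])
--
-- def TotalRange(points):
--     total = 0
--     X = 0
--     Y = 0
--     for i in range(len(points)-1):
--         for j in range(i+1,len(points)):
--             total += checkRangePos(points[i], points[j])
--             X += checkRangePosX(points[i], points[j])
--             Y += checkRangePosY(points[i], points[j])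
--     return total,X,Y
-- ===== SOURCE B (Python) =====
-- def TotalRange(points):
--     # sort each coordinate family once; prefix-sum scan gives all pairwise
--     # absolute differences; Chebyshev via rotated coords u=x+y, v=x-y:
--     # max(|dx|,|dy|) = (|du|+|dv|)/2
--     def pairsum(vals):
--         s = 0
--         pref = 0
--         i = 0
--         for v in sorted(vals):
--             s += i * v - pref
--             pref += v
--             i += 1
--         return s
--     X = pairsum([p[0] for p in points])
--     Y = pairsum([p[1] for p in points])
--     U = pairsum([p[0] + p[1] for p in points])
--     V = pairsum([p[0] - p[1] for p in points])
--     return (U + V) // 2, X, Y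
-- ===== Notes on version B (the rewrite author's own statement) =====
-- stated objective: faster
-- what changed: Replaces the O(n^2) all-pairs double loop by four sort+prefix-sum scans over the coordinates x, y, x+y, x-y, recovering the Chebyshev sum from max(|dx|,|dy|) = (|dx+dy|+|dx-dy|)/2.
import Mathlib
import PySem

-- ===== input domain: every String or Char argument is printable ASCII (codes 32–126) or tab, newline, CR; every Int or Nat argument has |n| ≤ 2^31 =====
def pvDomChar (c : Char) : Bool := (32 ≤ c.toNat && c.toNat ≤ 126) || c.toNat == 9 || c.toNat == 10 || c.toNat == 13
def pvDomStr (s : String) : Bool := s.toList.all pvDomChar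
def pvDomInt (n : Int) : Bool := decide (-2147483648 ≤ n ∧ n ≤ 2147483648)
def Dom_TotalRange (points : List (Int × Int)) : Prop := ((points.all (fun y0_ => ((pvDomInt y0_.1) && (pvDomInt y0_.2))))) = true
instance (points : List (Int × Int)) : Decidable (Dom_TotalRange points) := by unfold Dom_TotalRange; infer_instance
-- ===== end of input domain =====

-- B replaces A's O(n^2) all-pairs double loop by four sort+prefix-sum scans
-- (Chebyshev via the rotation u=x+y, v=x-y), computing the same three sums.

-- ===== PORT A =====
def checkRangePos (a b : Int × Int) : Int := max |a.1 - b.1| |a.2 - b.2|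

def checkRangePosX (a b : Int × Int) : Int := |a.1 - b.1|

def checkRangePosY (a b : Int × Int) : Int := |a.2 - b.2|

def TotalRange (points : List (Int × Int)) : Int × Int × Int :=
  (PySem.List.pyRange 0 (PySem.List.len points - 1) 1).foldl (fun acc i =>
    (PySem.List.pyRange (i + 1) (PySem.List.len points) 1).foldl (fun acc2 j =>
      (acc2.1 + checkRangePos (PySem.List.pyGetD points i (0, 0)) (PySem.List.pyGetD points j (0, 0)),
       acc2.2.1 + checkRangePosX (PySem.List.pyGetD points i (0, 0)) (PySem.List.pyGetD points j (0, 0)),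
       acc2.2.2 + checkRangePosY (PySem.List.pyGetD points i (0, 0)) (PySem.List.pyGetD points j (0, 0)))) acc)
    (0, 0, 0)

-- ===== PORT B =====
-- state of Source B's scan: (s, pref, i)
def pairsumStep (st : Int × Int × Int) (v : Int) : Int × Int × Int :=
  (st.1 + st.2.2 * v - st.2.1, st.2.1 + v, st.2.2 + 1)

def pairsum (vals : List Int) : Int :=
  ((PySem.List.sorted vals (fun x => x) false).foldl pairsumStep (0, 0, 0)).1

def TotalRange_alt (points : List (Int × Int)) : Int × Int × Int :=
  (PySem.Int.floordiv
      (pairsum (points.map (fun p => p.1 + p.2)) + pairsum (points.map (fun p => p.1 - p.2))) 2,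
   pairsum (points.map (fun p => p.1)),
   pairsum (points.map (fun p => p.2)))

-- ===== PRECONDITION & SPEC =====
def Spec_TotalRange (points : List (Int × Int)) (out : Int × Int × Int) : Prop := out = TotalRange_alt points
instance (points : List (Int × Int)) (out : Int × Int × Int) : Decidable (Spec_TotalRange points out) := by unfold Spec_TotalRange; infer_instance

-- ===== CLAIM (what is proved, stated in full; the proofs are below) =====
def Claim_equal_TotalRange : Prop := ∀ (points : List (Int × Int)), Dom_TotalRange points → Spec_TotalRange points (TotalRange points)

-- ===== LEMMAS AND PROOFS =====

-- sum of g x y over all index pairs i < j of the list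
def pairF (g : Int × Int → Int × Int → Int) : List (Int × Int) → Int
  | [] => 0
  | x :: xs => (xs.map (g x)).sum + pairF g xs

def pairAbs : List Int → Int
  | [] => 0
  | x :: xs => (xs.map (fun y => |x - y|)).sum + pairAbs xs

def pairSub : List Int → Int
  | [] => 0
  | x :: xs => (xs.map (fun y => y - x)).sum + pairSub xs

-- symbolic form of Source B's prefix scan, started at (pref, i)
def Cfun : List Int → Int → Int → Int
  | [], _, _ => 0
  | v :: r, pref, i => (i * v - pref) + Cfun r (pref + v) (i + 1)

lemma sum_map_sub (l : List Int) (v : Int) :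
    (l.map (fun y => y - v)).sum = l.sum - l.length * v := by
  have h1 := PySem.List.sum_map_add_int l (fun y => y) (fun _ => -v)
  have h2 := PySem.List.sum_map_const_int l (-v)
  simp only [sub_eq_add_neg]
  simp at h1 h2 ⊢

-- ---- A side: the double loop computes pairF of the three kernels ----

lemma tripleFold {α : Type} (g1 g2 g3 : α → Int) :
    ∀ (L : List α) (a : Int × Int × Int),
      L.foldl (fun acc b => (acc.1 + g1 b, acc.2.1 + g2 b, acc.2.2 + g3 b)) a
        = (a.1 + (L.map g1).sum, a.2.1 + (L.map g2).sum, a.2.2 + (L.map g3).sum) := by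
  intro L
  induction L with
  | nil => intro a; simp
  | cons x xs ih =>
    intro a
    simp only [List.foldl_cons, List.map_cons, List.sum_cons, ih]
    refine Prod.ext (by ring) (Prod.ext (by ring) (by ring))

lemma rowsum (g : Int × Int → Int × Int → Int) :
    ∀ l : List (Int × Int),
      ((List.range (l.length - 1)).map
        (fun k => ((l.drop (k + 1)).map (g (l.getD k (0, 0)))).sum)).sum = pairF g l := by
  intro l
  induction l with
  | nil => simp [pairF]
  | cons x xs ih =>
    cases xs with
    | nil => simp [pairF]
    | cons y ys =>
      have hlen : (x :: y :: ys : List (Int × Int)).length - 1 = ys.length + 1 := by simp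
      rw [hlen, List.range_succ_eq_map]
      simp only [List.map_cons, List.sum_cons, List.map_map]
      have hys : ((y :: ys : List (Int × Int)).length - 1) = ys.length := by simp
      rw [hys] at ih
      have hmap : ((List.range ys.length).map
            ((fun k => (((x :: y :: ys : List (Int × Int)).drop (k + 1)).map
              ((x :: y :: ys : List (Int × Int)).getD k (0, 0) |> g)).sum) ∘ Nat.succ))
          = (List.range ys.length).map
            (fun k => (((y :: ys : List (Int × Int)).drop (k + 1)).map
              (g ((y :: ys : List (Int × Int)).getD k (0, 0)))).sum) := by
        apply List.map_congr_left
        intro k _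
        rfl
      rw [hmap, ih]
      simp [pairF]

lemma castRow (fg : Int × Int → Int × Int → Int) (l : List (Int × Int)) :
    ((List.range (l.length - 1)).map
        ((fun i : Int => ((l.drop (i.toNat + 1)).map (fg (PySem.List.pyGetD l i (0, 0)))).sum) ∘
          (fun k : Nat => (k : Int)))).sum
      = pairF fg l := by
  rw [← rowsum fg l]
  refine congrArg List.sum (List.map_congr_left ?_)
  intro k _
  simp [Function.comp, PySem.List.pyGetD_natCast]

lemma A_eval (points : List (Int × Int)) :
    TotalRange points
      = (pairF checkRangePos points, pairF checkRangePosX points, pairF checkRangePosY points) := by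
  unfold TotalRange
  rw [PySem.List.foldl_congr_mem _ _ (fun acc i =>
      (acc.1 + ((points.drop (i.toNat + 1)).map (checkRangePos (PySem.List.pyGetD points i (0, 0)))).sum,
       acc.2.1 + ((points.drop (i.toNat + 1)).map (checkRangePosX (PySem.List.pyGetD points i (0, 0)))).sum,
       acc.2.2 + ((points.drop (i.toNat + 1)).map (checkRangePosY (PySem.List.pyGetD points i (0, 0)))).sum)) _ ?_]
  · rw [tripleFold]
    rw [PySem.List.pyRange_one]
    simp only [List.map_map, zero_add, PySem.List.len_eq]
    have hn : ((points.length : Int) - 1 - 0).toNat = points.length - 1 := by omega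
    rw [hn]
    rw [castRow checkRangePos, castRow checkRangePosX, castRow checkRangePosY]
  · intro acc i hi
    have h0 : (0 : Int) ≤ i := (PySem.List.mem_pyRange_one.mp hi).1
    have h1 : (0 : Int) ≤ i + 1 := by omega
    rw [PySem.List.foldl_pyRange_pyGetD points (0, 0)
        (fun acc2 b =>
          (acc2.1 + checkRangePos (PySem.List.pyGetD points i (0, 0)) b,
           acc2.2.1 + checkRangePosX (PySem.List.pyGetD points i (0, 0)) b,
           acc2.2.2 + checkRangePosY (PySem.List.pyGetD points i (0, 0)) b)) acc h1]
    rw [tripleFold]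
    have ht : (i + 1).toNat = i.toNat + 1 := by omega
    rw [ht]

-- ---- B side: the prefix scan computes pairAbs ----

lemma foldB : ∀ (l : List Int) (s pref i : Int),
    (l.foldl pairsumStep (s, pref, i)).1 = s + Cfun l pref i := by
  intro l
  induction l with
  | nil => intro s pref i; simp [Cfun]
  | cons v r ih =>
    intro s pref i
    simp only [List.foldl_cons, pairsumStep, Cfun, ih]
    ring

lemma Cfun_shift : ∀ (l : List Int) (pref i : Int),
    Cfun l pref i = Cfun l 0 0 + i * l.sum - pref * l.length := by
  intro l
  induction l with
  | nil => intro pref i; simp [Cfun]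
  | cons v r ih =>
    intro pref i
    simp only [Cfun, List.sum_cons, List.length_cons, zero_add, zero_mul, sub_zero]
    rw [ih (pref + v) (i + 1), ih v 1]
    push_cast
    ring

lemma Cfun_pairSub : ∀ l : List Int, Cfun l 0 0 = pairSub l := by
  intro l
  induction l with
  | nil => simp [Cfun, pairSub]
  | cons v r ih =>
    simp only [Cfun, pairSub, sum_map_sub, zero_add, zero_mul, sub_zero]
    rw [Cfun_shift r v 1, ih]
    ring

lemma pairAbs_sorted : ∀ l : List Int, l.Pairwise (· ≤ ·) → pairAbs l = pairSub l := by
  intro l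
  induction l with
  | nil => intro _; rfl
  | cons x xs ih =>
    intro h
    rcases List.pairwise_cons.mp h with ⟨hx, hxs⟩
    simp only [pairAbs, pairSub, ih hxs]
    congr 1
    refine congrArg List.sum (List.map_congr_left ?_)
    intro y hy
    have : x - y ≤ 0 := by have := hx y hy; omega
    rw [abs_of_nonpos this]
    ring

lemma pairAbs_perm : ∀ {l l' : List Int}, l.Perm l' → pairAbs l = pairAbs l' := by
  intro l l' h
  induction h with
  | nil => rfl
  | cons x h ih => simp only [pairAbs, ih, (h.map _).sum_eq]
  | swap x y l => simp only [pairAbs, List.map_cons, List.sum_cons]; rw [abs_sub_comm y x]; ring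
  | trans _ _ ih1 ih2 => exact ih1.trans ih2

lemma pairsum_eq_pairAbs (vals : List Int) : pairsum vals = pairAbs vals := by
  unfold pairsum
  rw [foldB, Cfun_pairSub, zero_add]
  rw [← pairAbs_sorted _ (PySem.List.sorted_pairwise vals (fun x => x))]
  exact pairAbs_perm (PySem.List.sorted_perm vals (fun x => x) false)

lemma pairAbs_map (f : Int × Int → Int) :
    ∀ points : List (Int × Int),
      pairAbs (points.map f) = pairF (fun a b => |f a - f b|) points := by
  intro points
  induction points with
  | nil => rfl
  | cons x xs ih =>
    simp only [List.map_cons, pairAbs, pairF, List.map_map, ih]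
    rfl

lemma pairF_add (g h : Int × Int → Int × Int → Int) :
    ∀ l, pairF (fun a b => g a b + h a b) l = pairF g l + pairF h l := by
  intro l
  induction l with
  | nil => rfl
  | cons x xs ih =>
    simp only [pairF, ih, PySem.List.sum_map_add_int]
    ring

lemma cheb_point (p q : Int) : 2 * max |p| |q| = |p + q| + |p - q| := by
  rw [max_def]; split_ifs <;> simp only [Int.abs_eq_natAbs] at * <;> omega

lemma B_eval (points : List (Int × Int)) :
    TotalRange_alt points
      = (pairF checkRangePos points, pairF checkRangePosX points, pairF checkRangePosY points) := by
  unfold TotalRange_alt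
  rw [pairsum_eq_pairAbs, pairsum_eq_pairAbs, pairsum_eq_pairAbs, pairsum_eq_pairAbs,
      pairAbs_map, pairAbs_map, pairAbs_map, pairAbs_map]
  have hXY : (pairF (fun a b => |a.1 - b.1|) points = pairF checkRangePosX points)
      ∧ (pairF (fun a b => |a.2 - b.2|) points = pairF checkRangePosY points) := ⟨rfl, rfl⟩
  have hUV : pairF (fun a b => |(a.1 + a.2) - (b.1 + b.2)|) points
        + pairF (fun a b => |(a.1 - a.2) - (b.1 - b.2)|) points
      = pairF checkRangePos points + pairF checkRangePos points := by
    rw [← pairF_add, ← pairF_add]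
    congr 1
    funext a b
    have h := cheb_point (a.1 - b.1) (a.2 - b.2)
    have e1 : a.1 + a.2 - (b.1 + b.2) = (a.1 - b.1) + (a.2 - b.2) := by ring
    have e2 : a.1 - a.2 - (b.1 - b.2) = (a.1 - b.1) - (a.2 - b.2) := by ring
    rw [e1, e2, ← h]
    simp [checkRangePos]
    ring
  rw [hXY.1, hXY.2, hUV]
  rw [PySem.Int.floordiv_eq_ediv_of_pos (by norm_num)]
  congr 1
  omega

-- ===== VERDICT (by name: the statement is the Claim_ definition above) =====
theorem TotalRange_spec : Claim_equal_TotalRange := by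
  intro points _
  unfold Spec_TotalRange
  rw [A_eval, B_eval]
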